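-- pv_equiv track=rewrite | github.com/meh9184/coding-test-practice | midasit/test2.py | solution
-- ===== SOURCE A (Python) =====
-- def solution(s, t):
--
-- 	if len(s) % len(t) == 0 or len(t) % len(s) == 0:
--
-- 		if len(s) >= len(t):
--
-- 			rep = len(s) // len(t)
--
-- 			for i in range(rep):
--
-- 				if s[len(t) * i:len(t) * (i + 1)] != t:
--
-- 					answer = False
-- 					break
--
-- 				answer = True
--
-- 		else:
--
-- 			rep = len(t) // len(s)
--
-- 			for i in range(rep):
--
-- 				if t[len(s) * i:len(s) * (i + 1)] != s:
--
-- 					answer = False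
-- 					break
--
-- 				answer = True
--
--
-- 	else:
-- 		answer = False
--
-- 	return answer
-- ===== SOURCE B (Python) =====
-- def solution(s, t):
--     if len(s) % len(t) == 0 or len(t) % len(s) == 0:
--         if len(s) >= len(t):
--             return s == t * (len(s) // len(t))
--         return t == s * (len(t) // len(s))
--     return False
-- ===== Notes on version B (the rewrite author's own statement) =====
-- stated objective: simpler
-- what changed: Replaces the chunk-slicing loop that compares each length-|short| slice of the long string against the short string with a single build-and-compare: the long string is compared to the short string repeated len_long//len_short times.
import Mathlib
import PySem

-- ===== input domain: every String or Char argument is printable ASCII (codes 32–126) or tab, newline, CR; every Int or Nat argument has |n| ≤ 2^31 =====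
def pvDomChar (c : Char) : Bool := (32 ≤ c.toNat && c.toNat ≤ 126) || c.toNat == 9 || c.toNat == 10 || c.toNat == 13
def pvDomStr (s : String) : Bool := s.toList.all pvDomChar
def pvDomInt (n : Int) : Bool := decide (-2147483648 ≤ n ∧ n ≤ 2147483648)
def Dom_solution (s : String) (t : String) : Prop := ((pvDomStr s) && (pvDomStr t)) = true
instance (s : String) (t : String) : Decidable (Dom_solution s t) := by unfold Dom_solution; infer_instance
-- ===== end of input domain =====

-- B replaces A's chunk-slicing loop by a single build-and-compare with string repetition (objective: simpler).

-- ===== PORT A =====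
-- the for-loop with break: fuel = remaining iterations, i = current index
def chunkLoopA (big small : List Char) (i : Nat) : Nat → Bool
  | 0 => true
  | k+1 =>
    if PySem.List.slice big (some ((small.length * i : Nat) : Int))
        (some ((small.length * (i+1) : Nat) : Int)) ≠ small then false
    else chunkLoopA big small (i+1) k

def solution (s : String) (t : String) : Bool :=
  let ls := s.toList
  let lt := t.toList
  if ls.length % lt.length == 0 || lt.length % ls.length == 0 then
    if ls.length ≥ lt.length then
      chunkLoopA ls lt 0 (ls.length / lt.length)
    else
      chunkLoopA lt ls 0 (lt.length / ls.length)
  else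
    false

-- ===== PORT B =====
-- Python's  x * n  on strings
def repChars (x : List Char) : Nat → List Char
  | 0 => []
  | n+1 => x ++ repChars x n

def solution_alt (s : String) (t : String) : Bool :=
  let ls := s.toList
  let lt := t.toList
  if ls.length % lt.length == 0 || lt.length % ls.length == 0 then
    if ls.length ≥ lt.length then
      ls == repChars lt (ls.length / lt.length)
    else
      lt == repChars ls (lt.length / ls.length)
  else
    false

-- ===== PRECONDITION & SPEC =====
-- Pre_ excludes empty s or t, on which Python A (and B alike) raises ZeroDivisionError.
def Pre_solution (s : String) (t : String) : Prop := s.toList ≠ [] ∧ t.toList ≠ []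
instance (s : String) (t : String) : Decidable (Pre_solution s t) := by unfold Pre_solution; infer_instance

def pvWitness_solution : String × String := ("abab", "ab")

def Spec_solution (s : String) (t : String) (out : Bool) : Prop := out = solution_alt s t
instance (s : String) (t : String) (out : Bool) : Decidable (Spec_solution s t out) := by unfold Spec_solution; infer_instance

-- ===== CLAIM (what is proved, stated in full; the proofs are below) =====
def Claim_equal_solution : Prop := ∀ (s : String) (t : String), Dom_solution s t → Pre_solution s t → Spec_solution s t (solution s t)

-- ===== LEMMAS AND PROOFS =====

-- the loop starting at chunk i with k chunks to go checks exactly "the rest of big is k copies of small"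
lemma chunkLoopA_eq (small : List Char) :
    ∀ (k : Nat) (big : List Char) (i : Nat),
      big.length = small.length * (i + k) →
      chunkLoopA big small i k = (big.drop (small.length * i) == repChars small k) := by
  intro k
  induction k with
  | zero =>
    intro big i hlen
    have hnil : big.drop (small.length * i) = [] :=
      List.drop_eq_nil_iff.mpr (by rw [hlen, Nat.add_zero])
    simp [chunkLoopA, repChars, hnil]
  | succ k ih =>
    intro big i hlen
    have hslice : PySem.List.slice big (some ((small.length * i : Nat) : Int))
        (some ((small.length * (i+1) : Nat) : Int))
        = (big.drop (small.length * i)).take small.length := by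
      rw [PySem.List.slice_natCast]
      congr 1
      rw [Nat.mul_succ]
      omega
    have hdd : (big.drop (small.length * i)).drop small.length
        = big.drop (small.length * (i+1)) := by
      rw [List.drop_drop, Nat.mul_succ]
    by_cases hEq : (big.drop (small.length * i)).take small.length = small
    · have hrest := ih big (i+1) (by rw [hlen, show i + (k+1) = (i+1) + k by omega])
      have hdecomp : big.drop (small.length * i)
          = small ++ big.drop (small.length * (i+1)) := by
        conv_lhs => rw [← List.take_append_drop small.length (big.drop (small.length * i))]
        rw [hEq, hdd]
      rw [chunkLoopA, hslice, if_neg (by simp [hEq]), hrest, hdecomp]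
      rw [Bool.eq_iff_iff]
      simp [repChars]
    · rw [chunkLoopA, hslice, if_pos (by simpa using hEq)]
      have hne : ¬ (big.drop (small.length * i) = repChars small (k+1)) := by
        intro h
        apply hEq
        rw [h]
        show (small ++ repChars small k).take small.length = small
        exact List.take_left
      exact (beq_eq_false_iff_ne.mpr hne).symm

-- one branch of the outer if: divisibility turns the loop into the repeat-and-compare
lemma branch_eq (big small : List Char) (hmod : big.length % small.length = 0) :
    chunkLoopA big small 0 (big.length / small.length)
      = (big == repChars small (big.length / small.length)) := by
  rcases Nat.eq_zero_or_pos small.length with hz | hpos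
  · have hb : big.length = 0 := by rwa [hz, Nat.mod_zero] at hmod
    have hbig : big = [] := List.eq_nil_of_length_eq_zero hb
    subst hbig
    simp [chunkLoopA, repChars, hz]
  · have h := Nat.div_add_mod big.length small.length
    rw [hmod] at h
    have hlen : big.length = small.length * (0 + big.length / small.length) := by
      rw [Nat.zero_add]; omega
    have := chunkLoopA_eq small (big.length / small.length) big 0 hlen
    simpa using this

-- ===== VERDICT (by name: the statement is the Claim_ definition above) =====
theorem solution_spec : Claim_equal_solution := by
  intro s t _ hpre
  unfold Spec_solution solution solution_alt
  obtain ⟨hs, ht⟩ := hpre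
  have hs' : 0 < s.toList.length := List.length_pos_of_ne_nil hs
  have ht' : 0 < t.toList.length := List.length_pos_of_ne_nil ht
  by_cases hguard : (s.toList.length % t.toList.length == 0 || t.toList.length % s.toList.length == 0) = true
  · simp only [hguard, if_true]
    by_cases hge : s.toList.length ≥ t.toList.length
    · have hmod : s.toList.length % t.toList.length = 0 := by
        rcases (by simpa using hguard : s.toList.length % t.toList.length = 0 ∨
            t.toList.length % s.toList.length = 0) with h | h
        · exact h
        · rcases Nat.lt_or_ge t.toList.length s.toList.length with hlt | hle
          · rw [Nat.mod_eq_of_lt hlt] at h; omega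
          · have : t.toList.length = s.toList.length := by omega
            rw [this]; exact Nat.mod_self _
      simp only [hge, if_true]
      exact branch_eq s.toList t.toList hmod
    · have hmod : t.toList.length % s.toList.length = 0 := by
        rcases (by simpa using hguard : s.toList.length % t.toList.length = 0 ∨
            t.toList.length % s.toList.length = 0) with h | h
        · rw [Nat.mod_eq_of_lt (by omega)] at h; omega
        · exact h
      simp only [hge, if_false]
      exact branch_eq t.toList s.toList hmod
  · rw [Bool.not_eq_true] at hguard
    simp only [hguard, Bool.false_eq_true, if_false]
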